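-- pv_equiv track=rewrite | github.com/kgalloway2/VSC-Code | python stuff/sushigo.py | score_pudding
-- ===== SOURCE A (Python) =====
-- import math
--
-- def score_pudding(selected_cards):
--     num_pudding = []
--     result1 = []
--     result2 = []
--     for i in selected_cards:
--         num_pudding.append(i.count("pudding"))
--
--     # find person(s) with max pudding
--     max_pudding = max(num_pudding)
--     if num_pudding.count(max_pudding) > 1:
--         people_with_max = []
--         num_people_with_max = 0
--         for j in num_pudding:
--             people_with_max.append(False)
--             if j == max_pudding:
--                 people_with_max[-1] = True
--                 num_people_with_max += 1
--         num_points_for_max = 6  // num_people_with_max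
--
--         for i in range(len(people_with_max)):
--             if people_with_max[i]:
--                 result1.append({i: num_points_for_max})
--
--     elif num_pudding.count(max_pudding) == 1:
--         person_with_max = num_pudding.index(max_pudding)
--         num_points_for_max = 6
--         result1.append({person_with_max: num_points_for_max})
--
--     # find person(s) with least pudding
--
--     min_pudding = min(num_pudding)
--     if num_pudding.count(min_pudding) > 1:
--
--         people_with_min_pudding = []
--         num_people_with_min_pudding = 0
--         for j in num_pudding:
--             people_with_min_pudding.append(False)
--             if j == min_pudding:
--                 people_with_min_pudding[-1] = True
--                 num_people_with_min_pudding += 1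
--         num_points_for_min_pudding = math.ceil(-6 / num_people_with_min_pudding)
--
--         for i in range(len(people_with_min_pudding)):
--             if people_with_min_pudding[i]:
--                 result2.append({i: num_points_for_min_pudding})
--
--     elif num_pudding.count(min_pudding) == 1:
--         person_with_min_pudding = num_pudding.index(min_pudding)
--         num_points_for_min_pudding = -6
--         result2.append({person_with_min_pudding: num_points_for_min_pudding})
--
--     return result1, result2
-- ===== SOURCE B (Python) =====
-- def score_pudding(selected_cards):
--     # single streaming pass: track running max/min and their index lists
--     mx = mn = 0
--     mx_idx = mn_idx = None
--     for i, hand in enumerate(selected_cards):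
--         p = hand.count("pudding")
--         if mx_idx is None or p > mx:
--             mx, mx_idx = p, [i]
--         elif p == mx:
--             mx_idx.append(i)
--         if mn_idx is None or p < mn:
--             mn, mn_idx = p, [i]
--         elif p == mn:
--             mn_idx.append(i)
--     pts_max = 6 // len(mx_idx)
--     pts_min = -(6 // len(mn_idx))
--     return [{i: pts_max} for i in mx_idx], [{i: pts_min} for i in mn_idx]
-- ===== Notes on version B (the rewrite author's own statement) =====
-- stated objective: alternative
-- what changed: B makes a single streaming pass over the hands, maintaining the running max and min pudding counts together with the index lists of their current holders (reset on a new extremum, append on a tie), then scores the final index lists with 6//len and -(6//len); A instead builds the full count list, calls max/min/count/index on it and re-scans it with boolean marker arrays and range loops under tie-vs-single branches.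
-- outside the precondition, e.g. on score_pudding([]): A raises ValueError, B raises TypeError
import Mathlib
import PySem

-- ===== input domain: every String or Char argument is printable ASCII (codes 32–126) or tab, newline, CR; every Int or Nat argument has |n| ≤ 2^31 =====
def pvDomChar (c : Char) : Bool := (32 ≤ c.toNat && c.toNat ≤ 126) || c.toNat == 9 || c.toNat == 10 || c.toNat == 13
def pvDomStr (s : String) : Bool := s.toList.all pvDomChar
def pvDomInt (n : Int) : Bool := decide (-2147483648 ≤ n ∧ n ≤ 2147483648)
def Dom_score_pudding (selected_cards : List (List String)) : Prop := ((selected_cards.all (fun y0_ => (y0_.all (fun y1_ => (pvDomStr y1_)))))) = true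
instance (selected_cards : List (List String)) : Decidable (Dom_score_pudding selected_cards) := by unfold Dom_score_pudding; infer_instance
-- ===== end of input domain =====

-- B replaces A's staged passes (count list, max/min, count, boolean markers, range loops,
-- tie-vs-single branches) by one streaming pass keeping running max/min with their index
-- lists, scored at the end (objective: alternative).

-- ===== PORT A =====
-- A's per-max/min block, parameterised only by the sought value v and the point rules
-- (ptsOfCount for the tie branch, ptsOne = the literal used in the single-holder branch):
-- shared shape of A's two identically-written blocks, kept as one helper.
def pvABlock (num_pudding : List Int) (v : Int) (ptsOfCount : Int → Int) (ptsOne : Int) :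
    List (List (Int × Int)) :=
  if (PySem.List.count num_pudding v : Int) > 1 then
    -- people_with_* boolean list plus counter loop
    let s := num_pudding.foldl
      (fun (s : List Bool × Int) j =>
        let pw := s.1 ++ [false]
        if j = v then (pw.dropLast ++ [true], s.2 + 1) else (pw, s.2))
      ([], 0)
    let pts := ptsOfCount s.2
    -- for i in range(len(people_with_*)): if people_with_*[i]: result.append({i: pts})
    (PySem.List.pyRange 0 (s.1.length : Int) 1).foldl
      (fun acc i => if PySem.List.pyGetD s.1 i false then acc ++ [[(i, pts)]] else acc) []
  else if (PySem.List.count num_pudding v : Int) = 1 then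
    match PySem.List.index? num_pudding v with
    | some k => [[((k : Int), ptsOne)]]
    | none => []
  else []

def score_pudding (selected_cards : List (List String)) :
    (List (List (Int × Int))) × (List (List (Int × Int))) :=
  let num_pudding : List Int :=
    selected_cards.foldl (fun acc i => acc ++ [((PySem.List.count i "pudding" : Nat) : Int)]) []
  match PySem.List.max? num_pudding (fun x => x), PySem.List.min? num_pudding (fun x => x) with
  | some max_pudding, some min_pudding =>
    -- math.ceil(-6 / n) for an integer n ≥ 1 is exactly -(6 // n) (hand-ported: no floats in Lean)
    (pvABlock num_pudding max_pudding (fun n => PySem.Int.floordiv 6 n) 6,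
     pvABlock num_pudding min_pudding (fun n => -(PySem.Int.floordiv 6 n)) (-6))
  | _, _ => ([], [])  -- unreachable under Pre_: max([]) raises ValueError

-- ===== PORT B =====
-- B's loop body for one extremum: 'if idx is None or better p m: reset; elif p == m: append'.
def pvBStep (better : Int → Int → Bool) (st : Option (Int × List Int)) (ip : Int × Int) :
    Option (Int × List Int) :=
  match st with
  | none => some (ip.2, [ip.1])
  | some (m, is) =>
    if better ip.2 m then some (ip.2, [ip.1])
    else if ip.2 = m then some (m, is ++ [ip.1])
    else some (m, is)

def score_pudding_alt (selected_cards : List (List String)) :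
    (List (List (Int × Int))) × (List (List (Int × Int))) :=
  -- for i, hand in enumerate(selected_cards): p = hand.count("pudding"); update both states
  let st := (PySem.List.enumerate selected_cards 0).foldl
    (fun (st : Option (Int × List Int) × Option (Int × List Int)) ih =>
      let p : Int := ((PySem.List.count ih.2 "pudding" : Nat) : Int)
      (pvBStep (fun a b => a > b) st.1 (ih.1, p),
       pvBStep (fun a b => a < b) st.2 (ih.1, p)))
    (none, none)
  match st.1 with
  | none => ([], [])  -- only on empty input, where Python B raises TypeError (outside Pre_)
  | some mx =>
    match st.2 with
    | none => ([], [])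
    | some mn =>
      let ptsMax := PySem.Int.floordiv 6 (mx.2.length : Int)
      let ptsMin := -(PySem.Int.floordiv 6 (mn.2.length : Int))
      (mx.2.map (fun i => [(i, ptsMax)]), mn.2.map (fun i => [(i, ptsMin)]))

-- ===== PRECONDITION & SPEC =====
-- Pre_ excludes only the empty list, on which A raises ValueError (max of an empty sequence).
def Pre_score_pudding (selected_cards : List (List String)) : Prop := selected_cards ≠ []
instance (selected_cards : List (List String)) : Decidable (Pre_score_pudding selected_cards) := by
  unfold Pre_score_pudding; infer_instance
def pvWitness_score_pudding : List (List String) := [["pudding"], ["maki"]]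
def Spec_score_pudding (selected_cards : List (List String)) (out : (List (List (Int × Int))) × (List (List (Int × Int)))) : Prop := out = score_pudding_alt selected_cards
instance (selected_cards : List (List String)) (out : (List (List (Int × Int))) × (List (List (Int × Int)))) : Decidable (Spec_score_pudding selected_cards out) := by unfold Spec_score_pudding; infer_instance

-- ===== CLAIM (what is proved, stated in full; the proofs are below) =====
def Claim_equal_score_pudding : Prop := ∀ (selected_cards : List (List String)), Dom_score_pudding selected_cards → Pre_score_pudding selected_cards → Spec_score_pudding selected_cards (score_pudding selected_cards)

-- ===== LEMMAS AND PROOFS =====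

-- A's boolean-marker loop body, with the append-then-overwrite-last collapsed.
theorem pv_fn_eq (v : Int) :
    (fun (s : List Bool × Int) (j : Int) =>
        let pw := s.1 ++ [false]
        if j = v then (pw.dropLast ++ [true], s.2 + 1) else (pw, s.2))
      = fun s j => (s.1 ++ [decide (j = v)], if j = v then s.2 + 1 else s.2) := by
  funext s j
  by_cases h : j = v <;> simp [h]

-- The boolean-marker-plus-counter loop computes (map (· = v), count).
theorem pv_bools_fold (np : List Int) (v : Int) (bs : List Bool) (c : Int) :
    np.foldl (fun (s : List Bool × Int) j => (s.1 ++ [decide (j = v)], if j = v then s.2 + 1 else s.2)) (bs, c)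
      = (bs ++ np.map (fun j => decide (j = v)), c + (np.count v : Int)) := by
  induction np generalizing bs c with
  | nil => simp
  | cons h t ih =>
    show List.foldl _ (bs ++ [decide (h = v)], if h = v then c + 1 else c) t = _
    rw [ih]
    by_cases hv : h = v <;> simp [hv]
    ring

-- v ∉ xs ⇒ the filtered enumeration of xs is empty.
theorem pv_filter_enum_not_mem (xs : List Int) (v : Int) (s : Int) (h : v ∉ xs) :
    (PySem.List.enumerate xs s).filter (fun ip => decide (ip.2 = v)) = [] := by
  induction xs generalizing s with
  | nil => simp [PySem.List.enumerate_nil]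
  | cons x t ih =>
    simp only [List.mem_cons, not_or] at h
    simp [PySem.List.enumerate_cons, Ne.symm, h.1, ih _ h.2]

-- Core: A's per-value block is the filter-then-map over the enumerated counts.
theorem pv_block_eq (np : List Int) (v : Int) (g : Int → Int) (ptsOne : Int)
    (hg : g 1 = ptsOne) (hv : v ∈ np) :
    pvABlock np v g ptsOne
      = ((PySem.List.enumerate np 0).filter (fun ip => decide (ip.2 = v))).map
          (fun ip => [(ip.1, g ((PySem.List.count np v : Nat) : Int))]) := by
  unfold pvABlock
  rw [PySem.List.count_eq]
  by_cases h1 : ((List.count v np : Nat) : Int) > 1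
  · rw [if_pos h1, pv_fn_eq v, pv_bools_fold]
    simp only [List.nil_append, zero_add]
    rw [PySem.List.enumerate_eq_map_pyRange np v, List.filter_map, List.map_map]
    dsimp only [Function.comp_def]
    rw [PySem.List.foldl_append_if
      (fun i => PySem.List.pyGetD (np.map (fun j => decide (j = v))) i false)
      (fun i => [(i, g (List.count v np : Int))])]
    simp only [List.nil_append, List.length_map, PySem.List.len_eq]
    apply congrArg
    apply List.filter_congr
    intro i hi
    rw [PySem.List.mem_pyRange_one] at hi
    rw [PySem.List.pyGetD_eq_getElem _ false hi.1 (by simpa using hi.2),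
        PySem.List.pyGetD_eq_getElem _ v hi.1 (by simpa using hi.2),
        List.getElem_map]
  · rw [if_neg h1]
    have hc1 : List.count v np = 1 := by
      have := List.count_pos_iff.mpr hv
      omega
    rw [if_pos (by exact_mod_cast hc1)]
    obtain ⟨k, hk⟩ : ∃ k, PySem.List.index? np v = some k :=
      Option.isSome_iff_exists.mp ((PySem.List.index?_isSome_iff np v).mpr hv)
    obtain ⟨pre, suf, hsplit, hlen, hpre⟩ := (PySem.List.index?_eq_some_iff np v k).mp hk
    have hsuf : v ∉ suf := by
      have := hc1
      rw [hsplit, List.count_append, List.count_cons_self,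
        List.count_eq_zero.mpr hpre] at this
      exact List.count_eq_zero.mp (by omega)
    rw [hk, hsplit,
      PySem.List.enumerate_append, List.filter_append,
      PySem.List.enumerate_cons, List.filter_cons,
      pv_filter_enum_not_mem _ _ _ hpre, pv_filter_enum_not_mem _ _ _ hsuf]
    have hcnp : List.count v (pre ++ v :: suf) = 1 := hsplit ▸ hc1
    simp [hcnp, hg, hlen]

-- enumerating a mapped list
theorem pv_enumerate_map {a b : Type} (f : a → b) (l : List a) (s : Int) :
    PySem.List.enumerate (l.map f) s
      = (PySem.List.enumerate l s).map (fun p => (p.1, f p.2)) := by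
  induction l generalizing s with
  | nil => simp [PySem.List.enumerate_nil]
  | cons x t ih => simp [PySem.List.enumerate_cons, ih]

-- B's streaming fold computes the running maximum and its index list.
theorem pv_maxFold (np : List Int) (s m : Int) (is : List Int) :
    (PySem.List.enumerate np s).foldl (fun st ip => pvBStep (fun a b => decide (a > b)) st ip) (some (m, is))
      = some (np.foldl max m,
          (if np.foldl max m = m then is else []) ++
          ((PySem.List.enumerate np s).filter (fun ip => decide (ip.2 = np.foldl max m))).map Prod.fst) := by
  induction np generalizing s m is with
  | nil => simp [PySem.List.enumerate_nil]
  | cons h t ih =>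
    rw [PySem.List.enumerate_cons, List.foldl_cons, List.filter_cons]
    by_cases hgt : h > m
    · have hstep : pvBStep (fun a b => decide (a > b)) (some (m, is)) (s, h) = some (h, [s]) := by
        simp [pvBStep, hgt]
      rw [hstep, ih]
      have hMh : h ≤ t.foldl max h := (PySem.List.le_foldl_max t h).1
      have hfold : List.foldl max m (h :: t) = t.foldl max h := by
        simp [max_eq_right (le_of_lt hgt)]
      rw [hfold]
      have hMne : t.foldl max h ≠ m := by omega
      rw [if_neg hMne]
      by_cases hhM : h = t.foldl max h
      · simp [← hhM]
      · simp [hhM, Ne.symm hhM]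
    · by_cases heq : h = m
      · subst heq
        have hstep : pvBStep (fun a b => decide (a > b)) (some (h, is)) (s, h) = some (h, is ++ [s]) := by
          simp [pvBStep]
        rw [hstep, ih]
        have hfold : List.foldl max h (h :: t) = t.foldl max h := by simp
        rw [hfold]
        by_cases hMm : t.foldl max h = h
        · simp [hMm]
        · simp [hMm, Ne.symm hMm]
      · have hlt : h < m := lt_of_le_of_ne (not_lt.mp hgt) heq
        have hstep : pvBStep (fun a b => decide (a > b)) (some (m, is)) (s, h) = some (m, is) := by
          simp [pvBStep, not_lt.mpr (le_of_lt hlt), heq]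
        rw [hstep, ih]
        have hMm : m ≤ t.foldl max m := (PySem.List.le_foldl_max t m).1
        have hfold : List.foldl max m (h :: t) = t.foldl max m := by
          simp [max_eq_left (le_of_lt hlt)]
        rw [hfold]
        have hhM : ¬ (h = t.foldl max m) := by omega
        simp [hhM]

-- B's streaming fold computes the running minimum and its index list.
theorem pv_minFold (np : List Int) (s m : Int) (is : List Int) :
    (PySem.List.enumerate np s).foldl (fun st ip => pvBStep (fun a b => decide (a < b)) st ip) (some (m, is))
      = some (np.foldl min m,
          (if np.foldl min m = m then is else []) ++
          ((PySem.List.enumerate np s).filter (fun ip => decide (ip.2 = np.foldl min m))).map Prod.fst) := by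
  induction np generalizing s m is with
  | nil => simp [PySem.List.enumerate_nil]
  | cons h t ih =>
    rw [PySem.List.enumerate_cons, List.foldl_cons, List.filter_cons]
    by_cases hlt : h < m
    · have hstep : pvBStep (fun a b => decide (a < b)) (some (m, is)) (s, h) = some (h, [s]) := by
        simp [pvBStep, hlt]
      rw [hstep, ih]
      have hMh : t.foldl min h ≤ h := (PySem.List.foldl_min_le t h).1
      have hfold : List.foldl min m (h :: t) = t.foldl min h := by
        simp [min_eq_right (le_of_lt hlt)]
      rw [hfold]
      have hMne : t.foldl min h ≠ m := by omega
      rw [if_neg hMne]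
      by_cases hhM : h = t.foldl min h
      · simp [← hhM]
      · simp [hhM, Ne.symm hhM]
    · by_cases heq : h = m
      · subst heq
        have hstep : pvBStep (fun a b => decide (a < b)) (some (h, is)) (s, h) = some (h, is ++ [s]) := by
          simp [pvBStep]
        rw [hstep, ih]
        have hfold : List.foldl min h (h :: t) = t.foldl min h := by simp
        rw [hfold]
        by_cases hMm : t.foldl min h = h
        · simp [hMm]
        · simp [hMm, Ne.symm hMm]
      · have hgt : m < h := lt_of_le_of_ne (not_lt.mp hlt) (Ne.symm heq)
        have hstep : pvBStep (fun a b => decide (a < b)) (some (m, is)) (s, h) = some (m, is) := by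
          simp [pvBStep, not_lt.mpr (le_of_lt hgt), heq]
        rw [hstep, ih]
        have hMm : t.foldl min m ≤ m := (PySem.List.foldl_min_le t m).1
        have hfold : List.foldl min m (h :: t) = t.foldl min m := by
          simp [min_eq_left (le_of_lt hgt)]
        rw [hfold]
        have hhM : ¬ (h = t.foldl min m) := by omega
        simp [hhM]

-- length of the filtered enumeration = count
theorem pv_filter_enum_length (np : List Int) (s v : Int) :
    ((PySem.List.enumerate np s).filter (fun ip => decide (ip.2 = v))).length = np.count v := by
  induction np generalizing s with
  | nil => simp [PySem.List.enumerate_nil]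
  | cons h t ih =>
    rw [PySem.List.enumerate_cons, List.filter_cons, List.count_cons]
    by_cases hv : h = v <;> simp [hv, ih]

-- ===== VERDICT (by name: the statement is the Claim_ definition above) =====
theorem score_pudding_spec : Claim_equal_score_pudding := by
  intro sc _ hpre
  unfold Spec_score_pudding score_pudding score_pudding_alt
  rw [show (sc.foldl (fun acc i => acc ++ [((PySem.List.count i "pudding" : Nat) : Int)]) [])
      = sc.map (fun hand => ((PySem.List.count hand "pudding" : Nat) : Int)) from by
    simpa using PySem.List.foldl_append_singleton_eq_map
      (fun i => ((PySem.List.count i "pudding" : Nat) : Int)) sc []]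
  dsimp only
  -- B's single loop with two accumulators is two folds
  rw [PySem.List.foldl_prod_mk
    (f := fun a (ih : Int × List String) => pvBStep (fun x y => decide (x > y)) a (ih.1, ((PySem.List.count ih.2 "pudding" : Nat) : Int)))
    (g := fun a (ih : Int × List String) => pvBStep (fun x y => decide (x < y)) a (ih.1, ((PySem.List.count ih.2 "pudding" : Nat) : Int)))]
  have hfoldmapG : ∀ (better : Int → Int → Bool),
      (PySem.List.enumerate sc 0).foldl
          (fun a (ih : Int × List String) => pvBStep better a (ih.1, ((PySem.List.count ih.2 "pudding" : Nat) : Int))) none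
        = (PySem.List.enumerate (sc.map (fun hand => ((PySem.List.count hand "pudding" : Nat) : Int))) 0).foldl (fun a ip => pvBStep better a ip) none := by
    intro better
    rw [pv_enumerate_map, List.foldl_map]
  rw [hfoldmapG, hfoldmapG]
  cases hsc : sc with
  | nil => exact absurd hsc hpre
  | cons c0 cs =>
    simp only [List.map_cons, PySem.List.enumerate_cons, List.foldl_cons]
    have hstep : ∀ (better : Int → Int → Bool) (ip : Int × Int),
        pvBStep better none ip = some (ip.2, [ip.1]) := fun _ _ => rfl
    rw [hstep, hstep, pv_maxFold, pv_minFold,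
      PySem.List.max?_id_cons, PySem.List.min?_id_cons]
    dsimp only
    generalize hps : List.map (fun hand => ((PySem.List.count hand "pudding" : Nat) : Int)) cs = ps
    generalize hp0 : ((PySem.List.count c0 "pudding" : Nat) : Int) = p0
    set M := ps.foldl max p0 with hM
    set N := ps.foldl min p0 with hN
    have hMmem : M ∈ p0 :: ps := by
      rcases PySem.List.foldl_max_mem ps p0 with h | h
      · exact h ▸ List.mem_cons_self
      · exact List.mem_cons_of_mem _ h
    have hNmem : N ∈ p0 :: ps := by
      rcases PySem.List.foldl_min_mem ps p0 with h | h
      · exact h ▸ List.mem_cons_self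
      · exact List.mem_cons_of_mem _ h
    rw [pv_block_eq (p0 :: ps) M _ 6 (by decide) hMmem,
        pv_block_eq (p0 :: ps) N _ (-6) (by decide) hNmem]
    -- identify the head-index list with the full filtered enumeration
    have hjoin : ∀ (V : Int),
        ((if V = p0 then [(0 : Int)] else []) ++
          ((PySem.List.enumerate ps 1).filter (fun ip => decide (ip.2 = V))).map Prod.fst)
        = ((PySem.List.enumerate (p0 :: ps) 0).filter (fun ip => decide (ip.2 = V))).map Prod.fst := by
      intro V
      rw [PySem.List.enumerate_cons, List.filter_cons]
      by_cases hV : p0 = V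
      · simp [hV]
      · simp [hV, Ne.symm hV]
    simp only [zero_add]
    rw [hjoin, hjoin]
    have hlen : ∀ (V : Int),
        (((PySem.List.enumerate (p0 :: ps) 0).filter (fun ip => decide (ip.2 = V))).map Prod.fst).length
        = (p0 :: ps).count V := by
      intro V; rw [List.length_map, pv_filter_enum_length]
    rw [hlen, hlen, PySem.List.count_eq, PySem.List.count_eq]
    simp [List.map_map, Function.comp_def]
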